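-- pv_equiv track=rewrite | github.com/XiaobxTim/forkscaff-dlm | dllm/core/samplers/forkaware_mdlm.py | extract_effective_positions
-- ===== SOURCE A (Python) =====
-- def extract_effective_positions(commit_steps):
--     """
--     Flatten commit trajectory and remove consecutive duplicates.
--     Empty steps are ignored.
--     """
--     raw_positions = []
--     for step in commit_steps:
--         for pos in step:
--             if pos >= 0:
--                 raw_positions.append(int(pos))
--
--     if not raw_positions:
--         return []
--
--     effective_positions = [raw_positions[0]]
--     for pos in raw_positions[1:]:
--         if pos != effective_positions[-1]:
--             effective_positions.append(pos)
--
--     return effective_positions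
-- ===== SOURCE B (Python) =====
-- def extract_effective_positions(commit_steps):
--     """Single fused pass: flatten, filter negatives and drop consecutive
--     duplicates with a sentinel, no intermediate buffer."""
--     effective_positions = []
--     last = None
--     for step in commit_steps:
--         for pos in step:
--             if pos >= 0:
--                 v = int(pos)
--                 if v != last:
--                     effective_positions.append(v)
--                     last = v
--     return effective_positions
-- ===== Notes on version B (the rewrite author's own statement) =====
-- stated objective: simpler
-- what changed: Replaces A's two sequential passes (build a raw flattened-filtered buffer, then dedup it with [0]/[1:] head handling) by one fused traversal that keeps only a sentinel 'last' variable and appends directly.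
import Mathlib
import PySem

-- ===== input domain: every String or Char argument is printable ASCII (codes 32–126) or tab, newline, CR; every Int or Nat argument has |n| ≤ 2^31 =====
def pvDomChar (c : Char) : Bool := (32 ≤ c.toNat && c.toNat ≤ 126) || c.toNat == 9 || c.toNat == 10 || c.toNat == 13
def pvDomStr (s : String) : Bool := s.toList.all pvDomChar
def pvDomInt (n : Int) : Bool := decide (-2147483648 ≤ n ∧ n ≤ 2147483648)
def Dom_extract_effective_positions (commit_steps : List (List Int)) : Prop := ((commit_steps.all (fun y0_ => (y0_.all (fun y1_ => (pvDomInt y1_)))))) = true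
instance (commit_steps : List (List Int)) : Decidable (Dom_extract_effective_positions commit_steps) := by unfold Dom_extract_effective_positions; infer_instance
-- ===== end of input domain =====

-- B fuses A's two passes (flatten+filter buffer, then head/tail dedup) into one traversal with a sentinel last value; objective: simpler.


-- ===== PORT A =====
def extract_effective_positions (commit_steps : List (List Int)) : List Int :=
  let raw : List Int := commit_steps.foldl
    (fun acc step => step.foldl (fun acc pos => if pos ≥ 0 then acc ++ [pos] else acc) acc) []
  if raw = [] then []
  else raw.tail.foldl
    (fun eff pos => if pos ≠ eff.getLast! then eff ++ [pos] else eff) [raw.head!]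

-- ===== PORT B =====
def extract_effective_positions_alt (commit_steps : List (List Int)) : List Int :=
  (commit_steps.foldl
    (fun st step => step.foldl
      (fun st pos =>
        if pos ≥ 0 then
          if st.2 ≠ some pos then (st.1 ++ [pos], some pos) else st
        else st) st)
    (([] : List Int), (none : Option Int))).1

-- ===== PRECONDITION & SPEC =====
def Spec_extract_effective_positions (commit_steps : List (List Int)) (out : List Int) : Prop := out = extract_effective_positions_alt commit_steps
instance (commit_steps : List (List Int)) (out : List Int) : Decidable (Spec_extract_effective_positions commit_steps out) := by unfold Spec_extract_effective_positions; infer_instance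

-- ===== CLAIM (what is proved, stated in full; the proofs are below) =====
def Claim_equal_extract_effective_positions : Prop := ∀ (commit_steps : List (List Int)), Dom_extract_effective_positions commit_steps → Spec_extract_effective_positions commit_steps (extract_effective_positions commit_steps)

-- ===== LEMMAS AND PROOFS =====

-- dedup of a stream given the previously emitted value (sentinel form)
def pvDed : Option Int → List Int → List Int
  | _, [] => []
  | l, x :: xs => if l = some x then pvDed l xs else x :: pvDed (some x) xs

def pvDlast : Option Int → List Int → Option Int
  | l, [] => l
  | _, x :: xs => pvDlast (some x) xs

def pvFilt (s : List Int) : List Int := s.filter (fun p => decide (p ≥ 0))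

theorem pvDed_append (u v : List Int) (l : Option Int) :
    pvDed l (u ++ v) = pvDed l u ++ pvDed (pvDlast l u) v := by
  induction u generalizing l with
  | nil => simp [pvDed, pvDlast]
  | cons x xs ih =>
    simp only [List.cons_append, pvDed, pvDlast]
    by_cases h : l = some x <;> simp [h, ih]

theorem pvDlast_append (u v : List Int) (l : Option Int) :
    pvDlast l (u ++ v) = pvDlast (pvDlast l u) v := by
  induction u generalizing l with
  | nil => simp [pvDlast]
  | cons x xs ih => simp [pvDlast, ih]

-- A's inner flatten/filter loop
theorem pvA_inner (s : List Int) (acc : List Int) :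
    s.foldl (fun acc pos => if pos ≥ 0 then acc ++ [pos] else acc) acc = acc ++ pvFilt s := by
  induction s generalizing acc with
  | nil => simp [pvFilt]
  | cons x xs ih =>
    rw [List.foldl_cons]
    by_cases h : x ≥ 0
    · rw [if_pos h, ih]
      simp [pvFilt, h]
    · rw [if_neg h, ih]
      simp [pvFilt, h]

theorem pvA_outer (cs : List (List Int)) (acc : List Int) :
    cs.foldl (fun acc step => step.foldl
      (fun acc pos => if pos ≥ 0 then acc ++ [pos] else acc) acc) acc
      = acc ++ pvFilt cs.flatten := by
  induction cs generalizing acc with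
  | nil => simp [pvFilt]
  | cons s cs ih =>
    rw [List.foldl_cons, pvA_inner, ih]
    simp [pvFilt, List.filter_append]

-- A's dedup loop from a nonempty accumulator
theorem pvA_dedup (xs : List Int) (eff : List Int) (l : Int) :
    xs.foldl (fun eff pos => if pos ≠ eff.getLast! then eff ++ [pos] else eff) (eff ++ [l])
      = eff ++ [l] ++ pvDed (some l) xs := by
  induction xs generalizing eff l with
  | nil => simp [pvDed]
  | cons x xs ih =>
    rw [List.foldl_cons]
    by_cases h : x = l
    · subst h
      rw [if_neg (by simp), ih]
      simp [pvDed]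
    · rw [if_pos (by simp [h])]
      have hded : pvDed (some l) (x :: xs) = x :: pvDed (some x) xs := by
        have : ¬ (some l = some x) := by simpa using fun hc => h hc.symm
        simp [pvDed, this]
      have := ih (eff ++ [l]) x
      simp only [List.append_assoc] at this ⊢
      rw [this, hded]
      simp

theorem pvA_char (cs : List (List Int)) :
    extract_effective_positions cs = pvDed none (pvFilt cs.flatten) := by
  unfold extract_effective_positions
  rw [pvA_outer]
  simp only [List.nil_append]
  cases h : pvFilt cs.flatten with
  | nil => simp [pvDed]
  | cons x xs =>
    have hne : ¬ (x :: xs = ([] : List Int)) := by simp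
    rw [if_neg hne]
    simp only [List.head!_cons, List.tail_cons]
    have := pvA_dedup xs [] x
    simp only [List.nil_append] at this
    rw [this]
    have : pvDed (none : Option Int) (x :: xs) = x :: pvDed (some x) xs := by
      simp [pvDed]
    rw [this, List.singleton_append]

-- B's inner loop
theorem pvB_inner (s : List Int) (acc : List Int) (l : Option Int) :
    s.foldl (fun st pos =>
        if pos ≥ 0 then
          if st.2 ≠ some pos then (st.1 ++ [pos], some pos) else st
        else st) (acc, l)
      = (acc ++ pvDed l (pvFilt s), pvDlast l (pvFilt s)) := by
  induction s generalizing acc l with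
  | nil => simp [pvFilt, pvDed, pvDlast]
  | cons x xs ih =>
    rw [List.foldl_cons]
    by_cases h : x ≥ 0
    · by_cases he : l = some x
      · subst he
        rw [if_pos h, if_neg (by simp)]
        rw [ih]
        simp [pvFilt, h, pvDed, pvDlast]
      · rw [if_pos h, if_pos (by simpa using he)]
        rw [ih]
        simp [pvFilt, h, pvDed, pvDlast, he]
    · rw [if_neg h, ih]
      simp [pvFilt, h]

theorem pvB_char (cs : List (List Int)) :
    extract_effective_positions_alt cs = pvDed none (pvFilt cs.flatten) := by
  unfold extract_effective_positions_alt
  suffices h : ∀ (acc : List Int) (l : Option Int),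
      cs.foldl (fun st step => step.foldl
        (fun st pos =>
          if pos ≥ 0 then
            if st.2 ≠ some pos then (st.1 ++ [pos], some pos) else st
          else st) st) (acc, l)
        = (acc ++ pvDed l (pvFilt cs.flatten), pvDlast l (pvFilt cs.flatten)) by
    rw [h]; simp
  induction cs with
  | nil => intro acc l; simp [pvFilt, pvDed, pvDlast]
  | cons s cs ih =>
    intro acc l
    rw [List.foldl_cons, pvB_inner, ih]
    simp [pvFilt, List.filter_append, pvDed_append, pvDlast_append]

theorem extract_effective_positions_spec : Claim_equal_extract_effective_positions := by
  intro cs _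
  unfold Spec_extract_effective_positions
  rw [pvA_char, pvB_char]
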